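-- pv_equiv track=rewrite | github.com/daynanf/DSA-with-Codeforce | B_Simply_Sitting_on_Chairs.py | solve
-- ===== SOURCE A (Python) =====
-- def solve(n, p):
--     p = [x - 1 for x in p]
--     memo = {}
--
--     def dfs(pos, marked_tuple):
--         if pos >= n or pos in marked_tuple:
--             return 0
--
--         if (pos, marked_tuple) in memo:
--             return memo[(pos, marked_tuple)]
--         skip = dfs(pos + 1, marked_tuple)
--
--         new_marked = tuple(sorted(set(marked_tuple) | {p[pos]}))
--         sit = 1 + dfs(pos + 1, new_marked)
--
--         result = max(skip, sit)
--         memo[(pos, marked_tuple)] = result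
--         return result
--
--     return dfs(0, ())
-- ===== SOURCE B (Python) =====
-- def solve(n, p):
--     # Closed form: max over abort threshold T of #{q < T : p[q]-1 <= q or p[q]-1 >= T}:
--     # a position q < T may be sat on exactly when its chair p[q]-1 is already
--     # behind the walker or at/after the stopping point T.
--     m = n if n > 0 else 0
--     q = [x - 1 for x in p[:m]]
--     best = 0
--     for T in range(m + 1):
--         cnt = 0
--         for qi in range(T):
--             v = q[qi]
--             if v <= qi or v >= T:
--                 cnt += 1
--         if cnt > best:
--             best = cnt
--     return best
-- ===== Notes on version B (the rewrite author's own statement) =====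
-- stated objective: alternative
-- what changed: Replaced the memoized recursive search over all reachable marked-chair sets by a closed-form answer: the maximum over a stopping threshold T of the count of positions q < T whose chair p[q]-1 is either already passed (<= q) or at/after T; intended as asymptotically faster (A times out already at n=64 in that run) but a timing run could not confirm a ratio, so no speed is claimed.
import Mathlib
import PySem

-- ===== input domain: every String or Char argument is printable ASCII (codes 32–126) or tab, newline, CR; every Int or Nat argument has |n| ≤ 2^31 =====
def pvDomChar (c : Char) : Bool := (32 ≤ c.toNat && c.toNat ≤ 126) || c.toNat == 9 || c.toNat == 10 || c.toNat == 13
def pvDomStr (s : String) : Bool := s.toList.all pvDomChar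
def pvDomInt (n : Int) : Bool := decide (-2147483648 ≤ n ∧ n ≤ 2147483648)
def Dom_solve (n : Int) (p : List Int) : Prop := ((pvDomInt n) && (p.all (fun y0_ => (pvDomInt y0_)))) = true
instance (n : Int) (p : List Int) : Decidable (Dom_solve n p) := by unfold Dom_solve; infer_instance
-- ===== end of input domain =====

-- B replaces A's memoized search over marked-chair sets by a direct maximum over
-- stopping thresholds of a prefix count (objective: alternative algorithm).

-- ===== PORT A =====
-- tuple(sorted(set(marked_tuple) | {p[pos]})); p[pos] is in range on Pre_ (the .getD 0 is never read there)
def pvNewMarked (p1 : List Int) (pos : Int) (marked : List Int) : List Int :=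
  PySem.List.sorted (PySem.Set.add (PySem.Set.ofList marked) ((PySem.List.pyGet? p1 pos).getD 0)) (fun x => x) false

-- the inner dfs, with the memo dictionary threaded through; fuel = remaining positions + 1
-- (the fuel-0 branch is never reached from `solve`: fuel starts at n.toNat + 1 and the pos ≥ n test stops first)
def dfsA (n : Int) (p1 : List Int) : Nat → Int → List Int → PySem.Dict (Int × List Int) Int → Int × PySem.Dict (Int × List Int) Int
  | 0, _, _, memo => (0, memo)
  | fuel+1, pos, marked, memo =>
    if pos ≥ n ∨ pos ∈ marked then (0, memo)
    else
      match memo.get? (pos, marked) with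
      | some v => (v, memo)
      | none =>
        let r1 := dfsA n p1 fuel (pos + 1) marked memo
        let skip := r1.1
        let newMarked := pvNewMarked p1 pos marked
        let r2 := dfsA n p1 fuel (pos + 1) newMarked r1.2
        let sit := 1 + r2.1
        let result := max skip sit
        (result, r2.2.insert (pos, marked) result)

def solve (n : Int) (p : List Int) : Int :=
  let p1 := p.map (fun x => x - 1)
  (dfsA n p1 (n.toNat + 1) 0 [] PySem.Dict.empty).1

-- ===== PORT B =====
def solve_alt (n : Int) (p : List Int) : Int :=
  let m : Int := if n > 0 then n else 0
  let q : List Int := (PySem.List.slice p none (some m)).map (fun x => x - 1)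
  (PySem.List.pyRange 0 (m + 1) 1).foldl (fun best T =>
    let cnt : Int := (PySem.List.pyRange 0 T 1).foldl (fun cnt qi =>
      let v := (PySem.List.pyGet? q qi).getD 0   -- q[qi] is in range on Pre_
      if v ≤ qi ∨ v ≥ T then cnt + 1 else cnt) 0
    if cnt > best then cnt else best) 0

-- ===== PRECONDITION & SPEC =====
-- A evaluates p[pos] for every 0 ≤ pos < n, so Python raises IndexError exactly when len(p) < n.
def Pre_solve (n : Int) (p : List Int) : Prop := n ≤ (p.length : Int)
instance (n : Int) (p : List Int) : Decidable (Pre_solve n p) := by unfold Pre_solve; infer_instance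

def pvWitness_solve : Int × List Int := (3, [2, 3, 1])

def Spec_solve (n : Int) (p : List Int) (out : Int) : Prop := out = solve_alt n p
instance (n : Int) (p : List Int) (out : Int) : Decidable (Spec_solve n p out) := by unfold Spec_solve; infer_instance

-- ===== CLAIM (what is proved, stated in full; the proofs are below) =====
def Claim_equal_solve : Prop := ∀ (n : Int) (p : List Int), Dom_solve n p → Pre_solve n p → Spec_solve n p (solve n p)

-- ===== LEMMAS AND PROOFS =====

-- memo-free version of dfsA (same recursion, no dictionary)
def gA (n : Int) (p1 : List Int) : Nat → Int → List Int → Int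
  | 0, _, _ => 0
  | fuel+1, pos, marked =>
    if pos ≥ n ∨ pos ∈ marked then 0
    else max (gA n p1 fuel (pos + 1) marked)
             (1 + gA n p1 fuel (pos + 1) (pvNewMarked p1 pos marked))

-- canonical value of the game from (pos, marked)
def valA (n : Int) (p1 : List Int) (pos : Int) (marked : List Int) : Int :=
  gA n p1 ((n - pos).toNat + 1) pos marked

-- every memo entry is the canonical value
def GoodMemo (n : Int) (p1 : List Int) (memo : PySem.Dict (Int × List Int) Int) : Prop :=
  ∀ k v, memo.get? k = some v → v = valA n p1 k.1 k.2

-- first position t with pos ≤ t < pos + k and t marked, else pos + k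
def bnd (marked : List Int) : Nat → Nat → Nat
  | pos, 0 => pos
  | pos, k+1 => if (pos : Int) ∈ marked then pos else bnd marked (pos + 1) k

-- #{j : pos ≤ j < T, q[j] ≤ j or q[j] ≥ T}
def cfun (q : List Int) (pos T : Nat) : Nat :=
  ((List.range' pos (T - pos)).filter (fun j => decide (q.getD j 0 ≤ (j : Int) ∨ (T : Int) ≤ q.getD j 0))).length

-- closed-form value of the game: best threshold T before the first already-marked position
def hval (q : List Int) (N : Nat) (marked : List Int) (pos : Nat) : Nat :=
  (Finset.Icc pos (bnd marked pos (N - pos))).sup (fun T => cfun q pos T)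

theorem gA_fuel_congr (n : Int) (p1 : List Int) :
    ∀ (f1 f2 : Nat) (pos : Int) (marked : List Int),
      (n - pos).toNat < f1 → (n - pos).toNat < f2 →
      gA n p1 f1 pos marked = gA n p1 f2 pos marked := by
  intro f1
  induction f1 with
  | zero => intro f2 pos marked h1; omega
  | succ f ih =>
    intro f2 pos marked h1 h2
    cases f2 with
    | zero => omega
    | succ f2' =>
      simp only [gA]
      split_ifs with hc
      · rfl
      · push_neg at hc
        have hlt : pos < n := hc.1
        have ha : (n - (pos + 1)).toNat < f := by omega
        have hb : (n - (pos + 1)).toNat < f2' := by omega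
        rw [ih f2' (pos + 1) marked ha hb, ih f2' (pos + 1) (pvNewMarked p1 pos marked) ha hb]

theorem gA_succ (n : Int) (p1 : List Int) (fuel : Nat) (pos : Int) (marked : List Int) :
    gA n p1 (fuel + 1) pos marked =
      if pos ≥ n ∨ pos ∈ marked then 0
      else max (gA n p1 fuel (pos + 1) marked)
               (1 + gA n p1 fuel (pos + 1) (pvNewMarked p1 pos marked)) := rfl

theorem valA_unfold (n : Int) (p1 : List Int) (pos : Int) (marked : List Int) :
    valA n p1 pos marked =
      if pos ≥ n ∨ pos ∈ marked then 0
      else max (valA n p1 (pos + 1) marked)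
               (1 + valA n p1 (pos + 1) (pvNewMarked p1 pos marked)) := by
  by_cases hc : pos ≥ n ∨ pos ∈ marked
  · rw [if_pos hc]
    unfold valA
    rw [gA_succ, if_pos hc]
  · rw [if_neg hc]
    have h1 : valA n p1 pos marked =
        max (gA n p1 (n - pos).toNat (pos + 1) marked)
            (1 + gA n p1 (n - pos).toNat (pos + 1) (pvNewMarked p1 pos marked)) := by
      unfold valA
      rw [gA_succ, if_neg hc]
    rw [h1]
    rw [not_or, not_le] at hc
    have ha : (n - (pos + 1)).toNat < (n - pos).toNat := by omega
    rw [gA_fuel_congr n p1 ((n - pos).toNat) ((n - (pos + 1)).toNat + 1) (pos + 1) marked ha (by omega),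
        gA_fuel_congr n p1 ((n - pos).toNat) ((n - (pos + 1)).toNat + 1) (pos + 1) (pvNewMarked p1 pos marked) ha (by omega)]
    rfl

theorem dfsA_correct (n : Int) (p1 : List Int) :
    ∀ (fuel : Nat) (pos : Int) (marked : List Int) (memo : PySem.Dict (Int × List Int) Int),
      (n - pos).toNat < fuel → GoodMemo n p1 memo →
      (dfsA n p1 fuel pos marked memo).1 = valA n p1 pos marked ∧
        GoodMemo n p1 (dfsA n p1 fuel pos marked memo).2 := by
  intro fuel
  induction fuel with
  | zero => intro pos marked memo h1; omega
  | succ fuel ih =>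
    intro pos marked memo h1 hmemo
    simp only [dfsA]
    split_ifs with hc
    · exact ⟨by rw [valA_unfold]; simp [hc], hmemo⟩
    · cases hmg : memo.get? (pos, marked) with
      | some v =>
        exact ⟨(hmemo (pos, marked) v hmg).symm ▸ rfl, hmemo⟩
      | none =>
        push_neg at hc
        have hf : (n - (pos + 1)).toNat < fuel := by
          have := hc.1; omega
        obtain ⟨h1a, h1b⟩ := ih (pos + 1) marked memo hf hmemo
        obtain ⟨h2a, h2b⟩ := ih (pos + 1) (pvNewMarked p1 pos marked) _ hf h1b
        simp only []
        constructor
        · rw [h1a, h2a, valA_unfold n p1 pos marked]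
          simp [hc.1.not_ge, hc.2]
        · intro k v hkv
          by_cases hk : k = (pos, marked)
          · subst hk
            rw [PySem.Dict.get?_insert_self] at hkv
            cases hkv
            rw [h1a, h2a, valA_unfold n p1 pos marked]
            simp [hc.1.not_ge, hc.2]
          · rw [PySem.Dict.get?_insert_of_ne _ _ hk] at hkv
            exact h2b k v hkv

theorem mem_pvNewMarked (p1 : List Int) (pos : Int) (marked : List Int) (y : Int) :
    y ∈ pvNewMarked p1 pos marked ↔ y ∈ marked ∨ y = (PySem.List.pyGet? p1 pos).getD 0 := by
  unfold pvNewMarked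
  rw [PySem.List.mem_sorted, PySem.Set.mem_add, PySem.Set.mem_ofList]

theorem bnd_lb (marked : List Int) : ∀ (k pos : Nat), pos ≤ bnd marked pos k := by
  intro k
  induction k with
  | zero => intro pos; simp [bnd]
  | succ k ih =>
    intro pos
    simp only [bnd]
    split_ifs
    · exact le_refl _
    · exact le_trans (by omega) (ih (pos + 1))

theorem bnd_ub (marked : List Int) : ∀ (k pos : Nat), bnd marked pos k ≤ pos + k := by
  intro k
  induction k with
  | zero => intro pos; simp [bnd]
  | succ k ih =>
    intro pos
    simp only [bnd]
    split_ifs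
    · omega
    · exact le_trans (ih (pos + 1)) (by omega)

theorem bnd_not_mem (marked : List Int) : ∀ (k pos t : Nat), pos ≤ t → t < bnd marked pos k → (t : Int) ∉ marked := by
  intro k
  induction k with
  | zero => intro pos t h1 h2; simp only [bnd] at h2; omega
  | succ k ih =>
    intro pos t h1 h2
    simp only [bnd] at h2
    split_ifs at h2 with hm
    · omega
    · rcases Nat.eq_or_lt_of_le h1 with h | h
      · exact h ▸ hm
      · exact ih (pos + 1) t h h2

theorem bnd_mem (marked : List Int) : ∀ (k pos : Nat), bnd marked pos k < pos + k → ((bnd marked pos k : Nat) : Int) ∈ marked := by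
  intro k
  induction k with
  | zero => intro pos h; simp only [bnd] at h; omega
  | succ k ih =>
    intro pos h
    simp only [bnd] at h ⊢
    split_ifs at h ⊢ with hm
    · exact hm
    · exact ih (pos + 1) (by omega)

theorem bnd_mono (m1 m2 : List Int) (hsub : ∀ y : Int, y ∈ m1 → y ∈ m2) :
    ∀ (k pos : Nat), bnd m2 pos k ≤ bnd m1 pos k := by
  intro k
  induction k with
  | zero => intro pos; simp [bnd]
  | succ k ih =>
    intro pos
    simp only [bnd]
    split_ifs with h2 h1 h1
    · exact le_refl _
    · exact le_trans (by omega) (bnd_lb m1 k (pos + 1))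
    · exact absurd (hsub _ h1) h2
    · exact ih (pos + 1)

theorem bnd_congr (m1 m2 : List Int) :
    ∀ (k pos : Nat), (∀ t : Nat, pos ≤ t → ((t : Int) ∈ m1 ↔ (t : Int) ∈ m2)) →
      bnd m1 pos k = bnd m2 pos k := by
  intro k
  induction k with
  | zero => intro pos _; simp [bnd]
  | succ k ih =>
    intro pos hiff
    simp only [bnd]
    rw [if_congr (hiff pos (le_refl _)) rfl rfl]
    split_ifs
    · rfl
    · exact ih (pos + 1) (fun t ht => hiff t (by omega))

theorem bnd_nil : ∀ (k pos : Nat), bnd [] pos k = pos + k := by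
  intro k
  induction k with
  | zero => intro pos; simp [bnd]
  | succ k ih => intro pos; simp only [bnd, List.not_mem_nil, if_false]; rw [ih (pos + 1)]; omega

theorem cfun_self (q : List Int) (pos : Nat) : cfun q pos pos = 0 := by
  simp [cfun]

theorem cfun_succ_left (q : List Int) (pos T : Nat) (h : pos < T) :
    cfun q pos T =
      (if q.getD pos 0 ≤ (pos : Int) ∨ (T : Int) ≤ q.getD pos 0 then 1 else 0) + cfun q (pos + 1) T := by
  unfold cfun
  have h1 : T - pos = (T - (pos + 1)) + 1 := by omega
  rw [h1, List.range'_succ, List.filter_cons]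
  by_cases hc : q.getD pos 0 ≤ (pos : Int) ∨ (T : Int) ≤ q.getD pos 0
  · rw [if_pos (by simpa using hc), if_pos hc, List.length_cons]
    omega
  · rw [if_neg (by simpa using hc), if_neg hc, Nat.zero_add]

-- peel the T = pos term (whose count is 0) off the sup in hval
theorem sup_Icc_succ_left (B pos : Nat) (f : Nat → Nat) (hf : f pos = 0) (_h : pos + 1 ≤ B) :
    (Finset.Icc pos B).sup f = (Finset.Icc (pos + 1) B).sup f := by
  apply le_antisymm
  · apply Finset.sup_le
    intro T hT
    rw [Finset.mem_Icc] at hT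
    rcases Nat.eq_or_lt_of_le hT.1 with hEq | hLt
    · rw [← hEq, hf]; exact Nat.zero_le _
    · exact Finset.le_sup (Finset.mem_Icc.mpr ⟨hLt, hT.2⟩)
  · apply Finset.sup_le
    intro T hT
    rw [Finset.mem_Icc] at hT
    exact Finset.le_sup (Finset.mem_Icc.mpr ⟨by omega, hT.2⟩)

theorem hval_step (q marked marked' : List Int) (N pos : Nat) (x : Int)
    (hpos : pos < N) (hnm : (pos : Int) ∉ marked)
    (hm' : ∀ y : Int, y ∈ marked' ↔ y ∈ marked ∨ y = x)
    (hx : x = q.getD pos 0) :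
    hval q N marked pos = max (hval q N marked (pos + 1)) (1 + hval q N marked' (pos + 1)) := by
  have hk : N - pos = (N - (pos + 1)) + 1 := by omega
  set k := N - (pos + 1) with hkdef
  set B1 := bnd marked (pos + 1) k with hB1
  set B2 := bnd marked' (pos + 1) k with hB2
  have hbnd : bnd marked pos (N - pos) = B1 := by
    rw [hk]; simp only [bnd, hnm, if_false]
    exact hB1.symm
  have hpB1 : pos + 1 ≤ B1 := bnd_lb marked k (pos + 1)
  have hpB2 : pos + 1 ≤ B2 := bnd_lb marked' k (pos + 1)
  have hB1N : B1 ≤ N := by have := bnd_ub marked k (pos + 1); omega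
  have hB21 : B2 ≤ B1 := bnd_mono marked marked' (fun y hy => (hm' y).mpr (Or.inl hy)) k (pos + 1)
  -- if x is already behind pos, the two bounds agree
  have hB2eq : x ≤ (pos : Int) → B2 = B1 := by
    intro hxp
    apply bnd_congr
    intro t ht
    rw [hm' (t : Int)]
    constructor
    · rintro (h | h)
      · exact h
      · exfalso; omega
    · exact Or.inl
  -- inside [pos+1, B2] every T is at most x (when x is ahead of pos)
  have hTx : (pos : Int) < x → ∀ T : Nat, pos + 1 ≤ T → T ≤ B2 → (T : Int) ≤ x := by
    intro hpx T hT1 hT2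
    by_contra hlt
    push_neg at hlt
    have hx0 : 0 ≤ x := by omega
    have hxT : x.toNat < T := by omega
    have hxpos : pos + 1 ≤ x.toNat := by omega
    have : (x.toNat : Int) ∉ marked' := bnd_not_mem marked' k (pos + 1) x.toNat hxpos (by omega)
    apply this
    rw [hm']
    right
    omega
  -- inside [pos+1, B1], a T with the sit-indicator set is at most B2
  have hTB2 : ∀ T : Nat, pos + 1 ≤ T → T ≤ B1 → (x ≤ (pos : Int) ∨ (T : Int) ≤ x) → T ≤ B2 := by
    intro T hT1 hT2 hind
    rcases hind with hxp | hTle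
    · rw [hB2eq hxp]; exact hT2
    · by_contra hgt
      push_neg at hgt
      have hB2N : B2 < pos + 1 + k := by omega
      have hmem' : ((B2 : Nat) : Int) ∈ marked' := bnd_mem marked' k (pos + 1) hB2N
      rw [hm'] at hmem'
      rcases hmem' with hmm | hmx
      · exact bnd_not_mem marked k (pos + 1) B2 hpB2 (by omega) hmm
      · omega
  -- now rewrite the left-hand sup
  unfold hval
  rw [hbnd, sup_Icc_succ_left B1 pos _ (cfun_self q pos) hpB1]
  have hrw : ∀ T ∈ Finset.Icc (pos + 1) B1,
      cfun q pos T = (if x ≤ (pos : Int) ∨ (T : Int) ≤ x then 1 else 0) + cfun q (pos + 1) T := by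
    intro T hT
    rw [Finset.mem_Icc] at hT
    rw [cfun_succ_left q pos T (by omega), hx]
  rw [Finset.sup_congr rfl hrw]
  -- the skip side keeps bound B1, the sit side keeps bound B2
  have hbnd1 : bnd marked (pos + 1) (N - (pos + 1)) = B1 := rfl
  have hbnd2 : bnd marked' (pos + 1) (N - (pos + 1)) = B2 := rfl
  rw [hbnd1, hbnd2]
  apply le_antisymm
  · apply Finset.sup_le
    intro T hT
    have hTm := Finset.mem_Icc.mp hT
    by_cases hind : x ≤ (pos : Int) ∨ (T : Int) ≤ x
    · rw [if_pos hind]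
      have hTB2' : T ≤ B2 := hTB2 T hTm.1 hTm.2 hind
      calc 1 + cfun q (pos + 1) T
          ≤ 1 + (Finset.Icc (pos + 1) B2).sup (fun T => cfun q (pos + 1) T) :=
            Nat.add_le_add_left (Finset.le_sup (f := fun T => cfun q (pos + 1) T)
              (Finset.mem_Icc.mpr ⟨hTm.1, hTB2'⟩)) 1
        _ ≤ _ := le_max_right _ _
    · rw [if_neg hind]
      calc 0 + cfun q (pos + 1) T
          ≤ (Finset.Icc (pos + 1) B1).sup (fun T => cfun q (pos + 1) T) := by
            rw [Nat.zero_add]; exact Finset.le_sup (f := fun T => cfun q (pos + 1) T) hT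
        _ ≤ _ := le_max_left _ _
  · apply max_le
    · apply Finset.sup_le
      intro T hT
      calc cfun q (pos + 1) T
          ≤ (if x ≤ (pos : Int) ∨ (T : Int) ≤ x then 1 else 0) + cfun q (pos + 1) T := Nat.le_add_left _ _
        _ ≤ _ := Finset.le_sup (f := fun (T : Nat) => (if x ≤ (pos : Int) ∨ (T : Int) ≤ x then 1 else 0) + cfun q (pos + 1) T) hT
    · have hne : (Finset.Icc (pos + 1) B2).Nonempty := ⟨pos + 1, Finset.mem_Icc.mpr ⟨le_refl _, hpB2⟩⟩
      obtain ⟨T0, hT0, hsup⟩ := Finset.exists_mem_eq_sup _ hne (fun T => cfun q (pos + 1) T)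
      rw [hsup]
      have hT0m := Finset.mem_Icc.mp hT0
      have hind : x ≤ (pos : Int) ∨ ((T0 : Nat) : Int) ≤ x := by
        by_cases hxp : x ≤ (pos : Int)
        · exact Or.inl hxp
        · push_neg at hxp
          exact Or.inr (hTx hxp T0 hT0m.1 hT0m.2)
      calc 1 + cfun q (pos + 1) T0
          = (if x ≤ (pos : Int) ∨ ((T0 : Nat) : Int) ≤ x then 1 else 0) + cfun q (pos + 1) T0 := by
            rw [if_pos hind]
        _ ≤ _ := Finset.le_sup (f := fun (T : Nat) => (if x ≤ (pos : Int) ∨ (T : Int) ≤ x then 1 else 0) + cfun q (pos + 1) T)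
            (Finset.mem_Icc.mpr ⟨hT0m.1, le_trans hT0m.2 hB21⟩)

theorem hval_marked (q : List Int) (N : Nat) (marked : List Int) (pos : Nat)
    (hm : (pos : Int) ∈ marked) : hval q N marked pos = 0 := by
  unfold hval
  have hbnd : bnd marked pos (N - pos) = pos := by
    cases h : N - pos with
    | zero => simp [bnd]
    | succ k => simp [bnd, hm]
  rw [hbnd, Finset.Icc_self, Finset.sup_singleton, cfun_self]

theorem hval_terminal (q : List Int) (N : Nat) (marked : List Int) :
    hval q N marked N = 0 := by
  unfold hval
  have hbnd : bnd marked N (N - N) = N := by simp [bnd]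
  rw [hbnd, Finset.Icc_self, Finset.sup_singleton, cfun_self]

theorem valA_eq_hval (n : Int) (p1 q : List Int) (N : Nat)
    (hN : (N : Int) = n)
    (hq : ∀ j : Nat, j < N → (PySem.List.pyGet? p1 (j : Int)).getD 0 = q.getD j 0) :
    ∀ (k pos : Nat) (marked : List Int), N - pos = k → pos ≤ N →
      valA n p1 (pos : Int) marked = (hval q N marked pos : Int) := by
  intro k
  induction k with
  | zero =>
    intro pos marked hk hpo
    have hpe : pos = N := by omega
    subst hpe
    rw [valA_unfold, if_pos (Or.inl (by omega)), hval_terminal]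
    rfl
  | succ k ih =>
    intro pos marked hk hpo
    have hpos : pos < N := by omega
    by_cases hmem : (pos : Int) ∈ marked
    · rw [valA_unfold, if_pos (Or.inr hmem), hval_marked q N marked pos hmem]
      rfl
    · rw [valA_unfold, if_neg (by push_neg; exact ⟨by omega, hmem⟩)]
      have hcast : (pos : Int) + 1 = ((pos + 1 : Nat) : Int) := by push_cast; ring
      rw [hcast,
          ih (pos + 1) marked (by omega) (by omega),
          ih (pos + 1) (pvNewMarked p1 (pos : Int) marked) (by omega) (by omega)]
      rw [hval_step q marked (pvNewMarked p1 (pos : Int) marked) N pos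
            ((PySem.List.pyGet? p1 (pos : Int)).getD 0) hpos hmem
            (mem_pvNewMarked p1 (pos : Int) marked) (hq pos hpos)]
      simp [Nat.cast_max]

-- the running-max loop of B computes the Finset.sup over all thresholds
theorem foldl_max_eq_sup (g : Nat → Nat) :
    ∀ M : Nat, (List.range M).foldl (fun b k => if ((g k : Nat) : Int) > b then ((g k : Nat) : Int) else b) 0 =
      (((Finset.range M).sup g : Nat) : Int) := by
  intro M
  induction M with
  | zero => simp
  | succ M ih =>
    have hr : Finset.range (M + 1) = insert M (Finset.range M) := Finset.range_add_one
    rw [List.range_succ, List.foldl_append, List.foldl_cons, List.foldl_nil, ih,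
        hr, Finset.sup_insert]
    by_cases h : ((g M : Nat) : Int) ≤ (((Finset.range M).sup g : Nat) : Int)
    · rw [if_neg (by omega)]
      have h2 : (g M) ⊔ (Finset.range M).sup g = (Finset.range M).sup g := by
        apply sup_eq_right.mpr; exact_mod_cast h
      rw [h2]
    · rw [if_pos (by omega)]
      have h2 : (g M) ⊔ (Finset.range M).sup g = g M := by
        apply sup_eq_left.mpr
        have h3 : (((Finset.range M).sup g : Nat) : Int) ≤ ((g M : Nat) : Int) := by omega
        exact_mod_cast h3
      rw [h2]

theorem range_succ_eq_Icc (N : Nat) : Finset.range (N + 1) = Finset.Icc 0 N := by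
  ext x
  rw [Finset.mem_range, Finset.mem_Icc]
  omega

-- the inner loop of B computes cfun q 0 T
theorem inner_eq_cfun (q : List Int) (T : Nat) :
    (PySem.List.pyRange 0 (T : Int) 1).foldl (fun cnt qi =>
        if (PySem.List.pyGet? q qi).getD 0 ≤ qi ∨ (PySem.List.pyGet? q qi).getD 0 ≥ (T : Int)
        then cnt + 1 else cnt) 0 = (cfun q 0 T : Int) := by
  rw [PySem.List.foldl_ite_add_one]
  rw [PySem.List.pyRange_zero_natCast, List.countP_map]
  unfold cfun
  rw [← List.range_eq_range', Nat.sub_zero]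
  rw [← List.countP_eq_length_filter]
  rw [Int.zero_add]
  norm_cast
  apply List.countP_congr
  intro j hj
  simp only [Function.comp_apply, decide_eq_true_eq]
  rw [PySem.List.pyGet?_natCast]
  rw [show (q[j]?).getD 0 = q.getD j 0 from (List.getD_eq_getElem?_getD ..).symm]

theorem solve_alt_eq_sup (n : Int) (p : List Int) (hn : 0 < n) :
    solve_alt n p = (((Finset.Icc 0 n.toNat).sup (cfun ((p.map (fun x => x - 1)).take n.toNat) 0) : Nat) : Int) := by
  unfold solve_alt
  simp only [if_pos hn]
  have hq : (PySem.List.slice p none (some n)).map (fun x => x - 1) =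
      (p.map (fun x => x - 1)).take n.toNat := by
    rw [PySem.List.slice_to p (le_of_lt hn), List.map_take]
  rw [hq]
  set q := (p.map (fun x => x - 1)).take n.toNat with hqdef
  have hn1 : n + 1 = ((n.toNat + 1 : Nat) : Int) := by omega
  rw [hn1, PySem.List.pyRange_zero_natCast, List.foldl_map]
  refine Eq.trans (PySem.List.foldl_congr_mem' _ _
      (fun b (k : Nat) => if ((cfun q 0 k : Nat) : Int) > b then ((cfun q 0 k : Nat) : Int) else b) _ ?_) ?_
  · intro k _ b
    simp only []
    rw [inner_eq_cfun q k]
  · rw [foldl_max_eq_sup (cfun q 0) (n.toNat + 1), range_succ_eq_Icc]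

theorem solve_eq_zero_of_nonpos (n : Int) (p : List Int) (hn : n ≤ 0) : solve n p = 0 := by
  unfold solve
  have h1 : n.toNat = 0 := by omega
  rw [h1]
  simp only [dfsA]
  rw [if_pos (Or.inl (by omega))]

theorem solve_alt_eq_zero_of_nonpos (n : Int) (p : List Int) (hn : n ≤ 0) : solve_alt n p = 0 := by
  unfold solve_alt
  rw [if_neg (by omega)]
  simp only []
  rw [show (0 : Int) + 1 = 1 from rfl,
      show PySem.List.pyRange 0 1 1 = [0] from rfl,
      List.foldl_cons, List.foldl_nil,
      show PySem.List.pyRange 0 0 1 = [] from rfl,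
      List.foldl_nil]
  norm_num

-- ===== VERDICT (by name: the statement is the Claim_ definition above) =====
theorem solve_spec : Claim_equal_solve := by
  unfold Claim_equal_solve
  intro n p _ hpre
  unfold Spec_solve
  by_cases hn : n ≤ 0
  · rw [solve_eq_zero_of_nonpos n p hn, solve_alt_eq_zero_of_nonpos n p hn]
  · rw [not_le] at hn
    -- A's side: the memoized dfs computes the canonical game value
    have hmain := dfsA_correct n (p.map (fun x => x - 1)) (n.toNat + 1) 0 []
        PySem.Dict.empty (by omega) (fun k v hkv => by rw [PySem.Dict.get?_empty] at hkv; cases hkv)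
    have hsolve : solve n p = valA n (p.map (fun x => x - 1)) 0 [] := by
      unfold solve; exact hmain.1
    -- the canonical value is the closed form
    have hN : ((n.toNat : Int)) = n := by omega
    have hlen : n.toNat ≤ p.length := by
      unfold Pre_solve at hpre; omega
    have hq : ∀ j : Nat, j < n.toNat →
        (PySem.List.pyGet? (p.map (fun x => x - 1)) (j : Int)).getD 0 =
          ((p.map (fun x => x - 1)).take n.toNat).getD j 0 := by
      intro j hj
      rw [PySem.List.pyGet?_natCast]
      rw [show ((p.map (fun x => x - 1))[j]?).getD 0 = (p.map (fun x => x - 1)).getD j 0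
          from (List.getD_eq_getElem?_getD ..).symm]
      have hjl : j < (p.map (fun x => x - 1)).length := by
        rw [List.length_map]; omega
      rw [List.getD_eq_getElem _ _ hjl,
          List.getD_eq_getElem _ _ (by rw [List.length_take]; omega)]
      rw [List.getElem_take]
    have hv := valA_eq_hval n (p.map (fun x => x - 1)) ((p.map (fun x => x - 1)).take n.toNat)
        n.toNat hN hq n.toNat 0 [] (by omega) (by omega)
    rw [hsolve]
    rw [show ((0 : Nat) : Int) = (0 : Int) from rfl] at hv
    rw [hv]
    rw [solve_alt_eq_sup n p hn]
    unfold hval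
    rw [Nat.sub_zero, bnd_nil n.toNat 0, Nat.zero_add]
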